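-- pv_equiv track=rewrite | github.com/vincedinh/t4gnlpproject | read_data.py | build_word_list
-- ===== SOURCE A (Python) =====
-- def build_word_list(train_data):
--     # Build word list from data
--     words = []
--     for item in train_data:
--         for key in item.keys():
--             if key == '_id':
--                 continue
--             else:
--                 for word in item[key]:
--                     if (word not in words):
--                         words.append(word)
--     words.sort()
--     return words
-- ===== SOURCE B (Python) =====
-- def build_word_list(train_data):
--     # Gather every word (with duplicates), sort once, then drop adjacent duplicates.
--     all_words = []
--     for item in train_data:
--         for key in item:
--             if key == '_id':
--                 continue
--             all_words.extend(item[key])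
--     all_words.sort()
--     out = []
--     for w in all_words:
--         if not out or out[-1] != w:
--             out.append(w)
--     return out
-- ===== Notes on version B (the rewrite author's own statement) =====
-- stated objective: faster
-- what changed: A dedupes with a linear 'word not in words' membership scan per word and sorts at the end; B collects all words with duplicates, sorts once, and removes adjacent duplicates in a single linear pass.
import Mathlib
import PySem

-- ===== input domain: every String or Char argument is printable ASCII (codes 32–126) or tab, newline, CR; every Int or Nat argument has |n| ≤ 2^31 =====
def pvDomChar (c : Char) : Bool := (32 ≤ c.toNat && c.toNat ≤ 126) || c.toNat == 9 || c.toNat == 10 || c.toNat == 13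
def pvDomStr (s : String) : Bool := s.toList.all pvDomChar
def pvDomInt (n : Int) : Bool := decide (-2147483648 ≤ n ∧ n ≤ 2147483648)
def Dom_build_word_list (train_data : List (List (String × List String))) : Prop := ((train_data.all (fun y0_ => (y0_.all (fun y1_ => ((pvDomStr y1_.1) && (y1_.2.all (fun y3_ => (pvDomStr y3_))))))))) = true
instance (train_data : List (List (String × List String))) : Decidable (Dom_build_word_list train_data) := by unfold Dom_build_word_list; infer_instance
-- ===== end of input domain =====

-- B replaces A's quadratic per-word membership scan by sort-once + adjacent-duplicate removal (faster).


-- dict lookup item[key]: first matching pair (how both Pythons read item[key])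
def pvLookup (item : List (String × List String)) (k : String) : List String :=
  ((item.find? (fun p => p.1 == k)).map Prod.snd).getD []

-- ===== PORT A =====
def build_word_list (train_data : List (List (String × List String))) : List String :=
  let words := train_data.foldl (fun ws item =>
    item.foldl (fun ws p =>
      if p.1 == "_id" then ws
      else (pvLookup item p.1).foldl (fun ws w => if w ∈ ws then ws else ws ++ [w]) ws) ws) []
  PySem.List.sorted words (fun x => x) false

-- ===== PORT B =====
def build_word_list_alt (train_data : List (List (String × List String))) : List String :=
  let all_words := train_data.foldl (fun acc item =>
    item.foldl (fun a p => if p.1 == "_id" then a else a ++ pvLookup item p.1) acc) []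
  let sorted_words := PySem.List.sorted all_words (fun x => x) false
  sorted_words.foldl (fun out w =>
    if out = [] ∨ out.getLast? ≠ some w then out ++ [w] else out) []

-- ===== PRECONDITION & SPEC =====
def Spec_build_word_list (train_data : List (List (String × List String))) (out : List String) : Prop := out = build_word_list_alt train_data
instance (train_data : List (List (String × List String))) (out : List String) : Decidable (Spec_build_word_list train_data out) := by unfold Spec_build_word_list; infer_instance

-- ===== CLAIM (what is proved, stated in full; the proofs are below) =====
def Claim_equal_build_word_list : Prop := ∀ (train_data : List (List (String × List String))), Dom_build_word_list train_data → Spec_build_word_list train_data (build_word_list train_data)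

-- ===== LEMMAS AND PROOFS =====

-- A's first-seen dedup step / B's adjacent-dedup step, named for the proofs
def dstep (ws : List String) (w : String) : List String := if w ∈ ws then ws else ws ++ [w]
def gstep (out : List String) (w : String) : List String :=
  if out = [] ∨ out.getLast? ≠ some w then out ++ [w] else out

-- the flat word stream both programs traverse
def flatWords (train_data : List (List (String × List String))) : List String :=
  train_data.flatMap (fun item =>
    item.flatMap (fun p => if p.1 == "_id" then [] else pvLookup item p.1))

lemma foldl_foldl_flatMap {α β σ : Type} (L : α → List β) (f : σ → β → σ) :
    ∀ (xs : List α) (acc : σ),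
      xs.foldl (fun s x => (L x).foldl f s) acc = (xs.flatMap L).foldl f acc := by
  intro xs
  induction xs with
  | nil => intro acc; simp
  | cons x xs ih => intro acc; simp [List.foldl_append, ih]

lemma build_word_list_eq :
    ∀ train_data, build_word_list train_data
      = PySem.List.sorted ((flatWords train_data).foldl dstep []) (fun x => x) false := by
  intro td
  dsimp only [build_word_list, flatWords]
  congr 1
  have h1 : ∀ (item : List (String × List String)) (ws : List String),
      item.foldl (fun ws p =>
        if p.1 == "_id" then ws
        else (pvLookup item p.1).foldl (fun ws w => if w ∈ ws then ws else ws ++ [w]) ws) ws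
      = (item.flatMap (fun p => if p.1 == "_id" then [] else pvLookup item p.1)).foldl dstep ws := by
    intro item ws
    rw [← foldl_foldl_flatMap]
    congr 1
    funext a p
    by_cases h : p.1 == "_id"
    · simp [h]
    · simp only [h, Bool.false_eq_true, if_false]; rfl
  calc td.foldl (fun ws item =>
        item.foldl (fun ws p =>
          if p.1 == "_id" then ws
          else (pvLookup item p.1).foldl (fun ws w => if w ∈ ws then ws else ws ++ [w]) ws) ws) []
      = td.foldl (fun ws item =>
          (item.flatMap (fun p => if p.1 == "_id" then [] else pvLookup item p.1)).foldl dstep ws) [] := by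
        congr 1; funext ws item; exact h1 item ws
    _ = _ := foldl_foldl_flatMap _ dstep td []

lemma build_word_list_alt_eq :
    ∀ train_data, build_word_list_alt train_data
      = (PySem.List.sorted (flatWords train_data) (fun x => x) false).foldl gstep [] := by
  intro td
  dsimp only [build_word_list_alt, flatWords, gstep]
  congr 2
  have h1 : ∀ (item : List (String × List String)) (a : List String),
      item.foldl (fun a p => if p.1 == "_id" then a else a ++ pvLookup item p.1) a
      = a ++ item.flatMap (fun p => if p.1 == "_id" then [] else pvLookup item p.1) := by
    intro item a
    rw [← PySem.List.foldl_append_eq_flatMap]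
    congr 1
    funext a p
    by_cases h : p.1 == "_id" <;> simp [h]
  calc td.foldl (fun acc item =>
        item.foldl (fun a p => if p.1 == "_id" then a else a ++ pvLookup item p.1) acc) []
      = td.foldl (fun acc item =>
          acc ++ item.flatMap (fun p => if p.1 == "_id" then [] else pvLookup item p.1)) [] := by
        congr 1; funext acc item; exact h1 item acc
    _ = _ := by rw [PySem.List.foldl_append_eq_flatMap]; simp

-- A's accumulator: membership and nodup
lemma mem_foldl_dstep : ∀ (xs acc : List String) (x : String),
    x ∈ xs.foldl dstep acc ↔ x ∈ acc ∨ x ∈ xs := by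
  intro xs
  induction xs with
  | nil => intro acc x; simp
  | cons y ys ih =>
    intro acc x
    simp only [List.foldl_cons, ih, dstep]
    by_cases h : y ∈ acc
    · simp only [h, if_pos, List.mem_cons]
      constructor
      · rintro (h1 | h1)
        · exact Or.inl h1
        · exact Or.inr (Or.inr h1)
      · rintro (h1 | rfl | h1)
        · exact Or.inl h1
        · exact Or.inl h
        · exact Or.inr h1
    · rw [if_neg h]
      simp only [List.mem_append, List.mem_cons]
      tauto
  
lemma nodup_foldl_dstep : ∀ (xs acc : List String), acc.Nodup → (xs.foldl dstep acc).Nodup := by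
  intro xs
  induction xs with
  | nil => intro acc h; exact h
  | cons y ys ih =>
    intro acc h
    simp only [List.foldl_cons, dstep]
    by_cases hy : y ∈ acc
    · rw [if_pos hy]; exact ih acc h
    · rw [if_neg hy]
      refine ih _ ?_
      rw [List.nodup_append]
      refine ⟨h, by simp, ?_⟩
      intro a ha b hb
      have hb2 : b = y := by simpa using hb
      subst hb2
      intro hay
      subst hay
      exact hy ha

-- in a strictly increasing list every member is ≤ the last element
lemma mem_le_getLast {a : String} : ∀ {out : List String}, out.Pairwise (· < ·) →
    ∀ (ho : out ≠ []), a ∈ out → a ≤ out.getLast ho := by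
  intro out
  induction out with
  | nil => intro _ ho; exact absurd rfl ho
  | cons b bs ih =>
    intro h ho ha
    obtain ⟨hb, hbs⟩ := List.pairwise_cons.1 h
    cases bs with
    | nil =>
      simp only [List.mem_singleton] at ha
      simp [ha, List.getLast]
    | cons c cs =>
      rw [List.getLast_cons (by simp)]
      rcases List.mem_cons.1 ha with rfl | ha
      · exact le_of_lt (hb _ (List.getLast_mem (by simp)))
      · exact ih hbs (by simp) ha

-- B's adjacent-dedup pass on a (≤)-sorted list: strictly increasing, same members
lemma gstep_invariant : ∀ (s out : List String), s.Pairwise (· ≤ ·) → out.Pairwise (· < ·) →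
    (∀ a ∈ out, ∀ b ∈ s, a ≤ b) →
    (s.foldl gstep out).Pairwise (· < ·) ∧ (∀ x, x ∈ s.foldl gstep out ↔ x ∈ out ∨ x ∈ s) := by
  intro s
  induction s with
  | nil => intro out _ h2 _; exact ⟨h2, by simp⟩
  | cons b rest ih =>
    intro out hs hout hle
    obtain ⟨hb, hrest⟩ := List.pairwise_cons.1 hs
    simp only [List.foldl_cons]
    by_cases hempty : out = []
    · subst hempty
      have hstep : gstep [] b = [b] := by simp [gstep]
      rw [hstep]
      have := ih [b] hrest (by simp) (by intro a ha c hc; simp only [List.mem_singleton] at ha; subst ha; exact hb c hc)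
      refine ⟨this.1, ?_⟩
      intro x; rw [this.2 x]; simp
    · by_cases hlast : out.getLast? = some b
      · have hstep : gstep out b = out := by simp [gstep, hempty, hlast]
        rw [hstep]
        have hbmem : b ∈ out := List.mem_of_getLast? hlast
        have := ih out hrest hout (by intro a ha c hc; exact hle a ha c (by simp [hc]))
        refine ⟨this.1, ?_⟩
        intro x; rw [this.2 x]
        constructor
        · rintro (h | h) <;> simp [h]
        · rintro (h | h)
          · exact Or.inl h
          · rcases List.mem_cons.1 h with rfl | h
            · exact Or.inl hbmem
            · exact Or.inr h
      · have hstep : gstep out b = out ++ [b] := by simp [gstep, hempty, hlast]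
        rw [hstep]
        have hlt : ∀ a ∈ out, a < b := by
          intro a ha
          have h1 : a ≤ out.getLast hempty := mem_le_getLast hout hempty ha
          have h2 : out.getLast hempty ≤ b := hle _ (List.getLast_mem hempty) b (by simp)
          have h3 : out.getLast hempty ≠ b := by
            intro hn; apply hlast; rw [List.getLast?_eq_some_getLast hempty, hn]
          exact lt_of_le_of_lt h1 (lt_of_le_of_ne h2 h3)
        have hpw : (out ++ [b]).Pairwise (· < ·) := by
          rw [List.pairwise_append]
          exact ⟨hout, by simp, by intro a ha c hc; simp only [List.mem_singleton] at hc; subst hc; exact hlt a ha⟩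
        have hle2 : ∀ a ∈ out ++ [b], ∀ c ∈ rest, a ≤ c := by
          intro a ha c hc
          rcases List.mem_append.1 ha with ha | ha
          · exact hle a ha c (by simp [hc])
          · simp only [List.mem_singleton] at ha; subst ha; exact hb c hc
        have := ih (out ++ [b]) hrest hpw hle2
        refine ⟨this.1, ?_⟩
        intro x; rw [this.2 x]; simp; tauto

-- ===== VERDICT (by name: the statement is the Claim_ definition above) =====
theorem build_word_list_spec : Claim_equal_build_word_list := by
  intro td _
  unfold Spec_build_word_list
  rw [build_word_list_eq, build_word_list_alt_eq]
  have hSle : (PySem.List.sorted (flatWords td) (fun x => x) false).Pairwise (· ≤ ·) := by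
    have := PySem.List.sorted_pairwise (flatWords td) (fun x => x)
    simpa using this
  obtain ⟨hpw, hmem⟩ := gstep_invariant (PySem.List.sorted (flatWords td) (fun x => x) false) [] hSle (by simp) (by simp)
  apply PySem.List.sorted_eq_of_perm_of_pairwise_lt
  · rw [List.perm_ext_iff_of_nodup (hpw.imp ne_of_lt) (nodup_foldl_dstep (flatWords td) [] (by simp))]
    intro x
    rw [hmem x, mem_foldl_dstep]
    simp [PySem.List.mem_sorted]
  · simpa using hpw
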